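-- pv_equiv track=rewrite | github.com/kennethsolomon/shipkit | setup-optimizer/lib/merge.py | extract_preservation_report
-- ===== SOURCE A (Python) =====
-- from typing import Dict, Tuple
--
-- def extract_preservation_report(preserved: Dict[str, str]) -> str:
--     """Format a human-readable report of preserved content.
--
--     Args:
--         preserved: Dict of section_name -> preservation_reason
--
--     Returns:
--         Formatted report string
--     """
--     if not preserved:
--         return ''
--
--     report_lines = ['📝 Preservation Report:', '']
--
--     user_edited = [s for s, r in preserved.items() if r == 'user-edited']
--     locked = [s for s, r in preserved.items() if r == 'locked']
--     kept = [s for s, r in preserved.items() if r == 'preserved']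
--
--     if user_edited:
--         report_lines.append('✅ Preserved (user-edited):')
--         for section in user_edited:
--             report_lines.append(f'   - {section}')
--         report_lines.append('')
--
--     if locked:
--         report_lines.append('🔒 Preserved (locked):')
--         for section in locked:
--             report_lines.append(f'   - {section}')
--         report_lines.append('')
--
--     if kept:
--         report_lines.append('📌 Preserved (as-is):')
--         for section in kept:
--             report_lines.append(f'   - {section}')
--
--     return '\n'.join(report_lines)
-- ===== SOURCE B (Python) =====
-- def extract_preservation_report(preserved):
--     """Format a human-readable report of preserved content.
--
--     One pass groups sections by reason; an ordered config table then
--     emits each group's header, lines and optional trailing blank.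
--     """
--     if not preserved:
--         return ''
--     groups = {}
--     for section, reason in preserved.items():
--         groups.setdefault(reason, []).append(section)
--     lines = ['📝 Preservation Report:', '']
--     for reason, header, trailing_blank in (
--         ('user-edited', '✅ Preserved (user-edited):', True),
--         ('locked', '🔒 Preserved (locked):', True),
--         ('preserved', '📌 Preserved (as-is):', False),
--     ):
--         sections = groups.get(reason, [])
--         if sections:
--             lines.append(header)
--             lines.extend('   - ' + s for s in sections)
--             if trailing_blank:
--                 lines.append('')
--     return '\n'.join(lines)
-- ===== Notes on version B (the rewrite author's own statement) =====
-- stated objective: alternative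
-- what changed: Replaced three separate comprehension passes and three hand-written header/body/blank blocks by a single grouping pass into a reason-keyed dict plus a data-driven loop over an ordered (reason, header, trailing-blank) config table.
import Mathlib
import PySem

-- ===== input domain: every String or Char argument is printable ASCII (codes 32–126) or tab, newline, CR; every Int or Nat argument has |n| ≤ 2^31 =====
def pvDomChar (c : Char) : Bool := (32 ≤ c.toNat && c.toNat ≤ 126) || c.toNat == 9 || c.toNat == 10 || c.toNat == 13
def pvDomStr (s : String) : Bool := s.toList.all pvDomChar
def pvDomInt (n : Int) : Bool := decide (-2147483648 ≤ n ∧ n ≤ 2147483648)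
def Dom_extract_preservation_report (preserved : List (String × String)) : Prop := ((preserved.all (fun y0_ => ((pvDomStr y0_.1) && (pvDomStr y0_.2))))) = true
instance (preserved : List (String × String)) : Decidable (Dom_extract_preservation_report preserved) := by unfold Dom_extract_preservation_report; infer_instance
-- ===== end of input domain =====

-- B replaces A's three filter passes and hard-coded blocks by one grouping pass plus a config-table loop (alternative decomposition, same cost).

-- ===== PORT A =====
def extract_preservation_report (preserved : List (String × String)) : String :=
  if preserved.isEmpty then "" else
  let report_lines : List String := ["📝 Preservation Report:", ""]
  let user_edited := (preserved.filter (fun p => p.2 == "user-edited")).map (·.1)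
  let locked := (preserved.filter (fun p => p.2 == "locked")).map (·.1)
  let kept := (preserved.filter (fun p => p.2 == "preserved")).map (·.1)
  let report_lines :=
    if user_edited.isEmpty then report_lines else
      (user_edited.foldl (fun acc sec => acc ++ ["   - " ++ sec])
        (report_lines ++ ["✅ Preserved (user-edited):"])) ++ [""]
  let report_lines :=
    if locked.isEmpty then report_lines else
      (locked.foldl (fun acc sec => acc ++ ["   - " ++ sec])
        (report_lines ++ ["🔒 Preserved (locked):"])) ++ [""]
  let report_lines :=
    if kept.isEmpty then report_lines else
      kept.foldl (fun acc sec => acc ++ ["   - " ++ sec])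
        (report_lines ++ ["📌 Preserved (as-is):"])
  PySem.Str.join "\n" report_lines

-- ===== PORT B =====
def extract_preservation_report_alt (preserved : List (String × String)) : String :=
  if preserved.isEmpty then "" else
  let groups : PySem.Dict String (List String) :=
    preserved.foldl (fun d p => d.modify p.2 [] (· ++ [p.1])) PySem.Dict.empty
  let config : List (String × String × Bool) :=
    [("user-edited", "✅ Preserved (user-edited):", true),
     ("locked", "🔒 Preserved (locked):", true),
     ("preserved", "📌 Preserved (as-is):", false)]
  let lines :=
    config.foldl (fun acc c =>
      let sections := groups.getD c.1 []
      if sections.isEmpty then acc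
      else acc ++ [c.2.1] ++ sections.map (fun s => "   - " ++ s)
             ++ (if c.2.2 then [""] else []))
      ["📝 Preservation Report:", ""]
  PySem.Str.join "\n" lines

-- ===== PRECONDITION & SPEC =====
def Spec_extract_preservation_report (preserved : List (String × String)) (out : String) : Prop := out = extract_preservation_report_alt preserved
instance (preserved : List (String × String)) (out : String) : Decidable (Spec_extract_preservation_report preserved out) := by unfold Spec_extract_preservation_report; infer_instance

-- ===== CLAIM (what is proved, stated in full; the proofs are below) =====
def Claim_equal_extract_preservation_report : Prop := ∀ (preserved : List (String × String)), Dom_extract_preservation_report preserved → Spec_extract_preservation_report preserved (extract_preservation_report preserved)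

-- ===== LEMMAS AND PROOFS =====

-- B's grouping dict looked up at reason r yields exactly A's filtered section list.
lemma groups_getD (l : List (String × String)) (r : String) :
    (l.foldl (fun d p => d.modify p.2 [] (· ++ [p.1])) PySem.Dict.empty).getD r []
      = (l.filter (fun p => p.2 == r)).map (·.1) := by
  have h := PySem.Dict.getD_foldl_modify_append
      (l := l.map (fun p => (p.2, p.1))) (d := (PySem.Dict.empty : PySem.Dict String (List String))) (c := r)
  simpa [List.foldl_map, List.filter_map, List.map_map, Function.comp] using h

-- a foldl that appends singletons, flattened form: the map of the loop body
lemma flatten_map_singleton (l : List (String × String)) :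
    (List.map ((fun x2 => ["   - " ++ x2]) ∘ (fun x : String × String => x.1)) l).flatten
      = List.map ((fun s => "   - " ++ s) ∘ (fun x : String × String => x.1)) l := by
  induction l with
  | nil => simp
  | cons a t ih => simp [ih]

-- ===== VERDICT (by name: the statement is the Claim_ definition above) =====
theorem extract_preservation_report_spec : Claim_equal_extract_preservation_report := by
  intro preserved _
  unfold Spec_extract_preservation_report extract_preservation_report extract_preservation_report_alt
  cases h : preserved.isEmpty
  · simp only [Bool.false_eq_true, if_false, List.foldl, groups_getD]
    simp [flatten_map_singleton, List.append_assoc]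
  · simp
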